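-- pv_equiv track=rewrite | github.com/AndreMercado/Project2 | b_features.py | count_filled_in_block
-- ===== SOURCE A (Python) =====
-- def pixel_is_filled(character: str) -> int:
--     # Step 19: Check if a character represents a drawn pixel.
--     # A space means the pixel is empty. Anything else ('+', '#', etc.) means filled.
--     return int(character != ' ')
--
-- def get_pixel(image: list[str], row: int, column: int) -> str:
--     # Step 25: Safely read one character from the image grid.
--     # Some lines may be shorter than expected, so return a space if out of bounds.
--     column_is_in_bounds: bool = column < len(image[row])
--     if column_is_in_bounds:
--         return image[row][column]
--     return ' '
--
-- def count_filled_in_block(image: list[str], row_start: int, row_end: int, col_start: int, col_end: int) -> tuple[int, int]: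
--     # Step 24: Count how many pixels are filled inside one rectangular block.
--     # Also count the total pixels in the block so we can compute a fraction later.
--     filled_count: int = 0
--     total_count:  int = 0
--     for row_index in range(row_start, row_end):
--         for col_index in range(col_start, col_end):
--             character: str = get_pixel(image, row_index, col_index)
--             filled_count += pixel_is_filled(character)
--             total_count  += 1
--     return filled_count, total_count
-- ===== SOURCE B (Python) =====
-- def count_filled_in_block(image: list[str], row_start: int, row_end: int, col_start: int, col_end: int) -> tuple[int, int]:
--     # Closed-form total; per-row slice instead of a per-pixel scan.
--     total_count = max(0, row_end - row_start) * max(0, col_end - col_start)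
--     filled_count = 0
--     if col_start < col_end:
--         for row_index in range(row_start, row_end):
--             segment = image[row_index][col_start:col_end]
--             filled_count += sum(ch != ' ' for ch in segment)
--     return filled_count, total_count
-- ===== Notes on version B (the rewrite author's own statement) =====
-- stated objective: simpler
-- what changed: Replaces the per-pixel nested loop with its get_pixel/pixel_is_filled helpers by a closed-form total_count (max(0,rows)*max(0,cols)) and a single per-row loop that counts non-space characters in the slice image[row][col_start:col_end].
-- outside the precondition, e.g. on count_filled_in_block(['ab'], 0, 1, -1, 2): A returns (3, 3), B returns (1, 3)
import Mathlib
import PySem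

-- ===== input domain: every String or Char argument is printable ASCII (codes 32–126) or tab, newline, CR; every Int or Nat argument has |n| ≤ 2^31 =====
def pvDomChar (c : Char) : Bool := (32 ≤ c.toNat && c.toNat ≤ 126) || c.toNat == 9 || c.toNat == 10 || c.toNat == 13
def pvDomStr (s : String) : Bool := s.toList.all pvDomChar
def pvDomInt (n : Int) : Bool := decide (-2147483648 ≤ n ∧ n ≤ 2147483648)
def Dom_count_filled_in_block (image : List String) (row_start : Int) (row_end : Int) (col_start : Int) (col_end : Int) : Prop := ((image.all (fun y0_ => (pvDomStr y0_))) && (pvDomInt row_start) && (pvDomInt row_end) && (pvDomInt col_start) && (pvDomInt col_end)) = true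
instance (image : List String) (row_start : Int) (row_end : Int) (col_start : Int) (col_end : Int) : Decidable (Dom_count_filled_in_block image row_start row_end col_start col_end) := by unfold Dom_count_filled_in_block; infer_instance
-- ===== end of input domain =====

-- B replaces the per-pixel nested scan by a closed-form total and a per-row slice count (objective: simpler).

-- ===== PORT A =====
def pixel_is_filled (character : Char) : Int :=
  if character ≠ ' ' then 1 else 0

def get_pixel (image : List String) (row : Int) (column : Int) : Char :=
  -- image[row]: an out-of-range row raises IndexError in Python (excluded by Pre_); the default "" is unreachable there.
  let line := PySem.List.pyGetD image row ""
  let column_is_in_bounds : Bool := decide (column < PySem.Str.len line)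
  if column_is_in_bounds then
    -- image[row][column]: column < -len(line) raises IndexError in Python (excluded by Pre_, which demands 0 ≤ column).
    PySem.List.pyGetD line.toList column ' '
  else ' '

def count_filled_in_block (image : List String) (row_start : Int) (row_end : Int) (col_start : Int) (col_end : Int) : Int × Int :=
  (PySem.List.pyRange row_start row_end 1).foldl
    (fun acc row_index =>
      (PySem.List.pyRange col_start col_end 1).foldl
        (fun acc2 col_index =>
          (acc2.1 + pixel_is_filled (get_pixel image row_index col_index), acc2.2 + 1))
        acc)
    (0, 0)

-- ===== PORT B =====
def count_filled_in_block_alt (image : List String) (row_start : Int) (row_end : Int) (col_start : Int) (col_end : Int) : Int × Int :=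
  let total_count : Int := max 0 (row_end - row_start) * max 0 (col_end - col_start)
  let filled_count : Int :=
    if col_start < col_end then
      (PySem.List.pyRange row_start row_end 1).foldl
        (fun filled row_index =>
          -- segment = image[row_index][col_start:col_end]
          filled + (((PySem.List.slice (PySem.List.pyGetD image row_index "").toList (some col_start) (some col_end)).countP (fun ch => ch != ' ')) : Int))
        0
    else 0
  (filled_count, total_count)

-- ===== PRECONDITION & SPEC =====
-- For nonempty blocks (an empty block touches nothing and both return (0, 0)), Pre_ excludes (a) row ranges that
-- leave [-len(image), len(image)), where A raises IndexError, and (b) negative col_start, a defensible unspecified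
-- corner where A's value comes from Python's negative-index wraparound (reading pixels from the right edge) while
-- B's slice clamps; see the cite in claim.json.
def Pre_count_filled_in_block (image : List String) (row_start : Int) (row_end : Int) (col_start : Int) (col_end : Int) : Prop :=
  row_start < row_end → col_start < col_end →
    (0 ≤ col_start ∧ -(PySem.List.len image) ≤ row_start ∧ row_end ≤ PySem.List.len image)
instance (image : List String) (row_start : Int) (row_end : Int) (col_start : Int) (col_end : Int) : Decidable (Pre_count_filled_in_block image row_start row_end col_start col_end) := by unfold Pre_count_filled_in_block; infer_instance

def pvWitness_count_filled_in_block : List String × Int × Int × Int × Int := (["#+ ", " ##"], 0, 2, 0, 3)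

def Spec_count_filled_in_block (image : List String) (row_start : Int) (row_end : Int) (col_start : Int) (col_end : Int) (out : Int × Int) : Prop := out = count_filled_in_block_alt image row_start row_end col_start col_end
instance (image : List String) (row_start : Int) (row_end : Int) (col_start : Int) (col_end : Int) (out : Int × Int) : Decidable (Spec_count_filled_in_block image row_start row_end col_start col_end out) := by unfold Spec_count_filled_in_block; infer_instance

-- ===== CLAIM (what is proved, stated in full; the proofs are below) =====
def Claim_equal_count_filled_in_block : Prop := ∀ (image : List String) (row_start : Int) (row_end : Int) (col_start : Int) (col_end : Int), Dom_count_filled_in_block image row_start row_end col_start col_end → Pre_count_filled_in_block image row_start row_end col_start col_end → Spec_count_filled_in_block image row_start row_end col_start col_end (count_filled_in_block image row_start row_end col_start col_end)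

-- ===== LEMMAS AND PROOFS =====

-- The inner column loop of A over one row equals the non-space count of B's slice of that row.
lemma pv_inner_eq (image : List String) (row_index : Int) (ce : Int) (hce : 0 ≤ ce) :
    ∀ (n : Nat) (cs : Int) (acc : Int × Int), 0 ≤ cs → (ce - cs).toNat = n →
      (PySem.List.pyRange cs ce 1).foldl
        (fun acc2 col_index =>
          (acc2.1 + pixel_is_filled (get_pixel image row_index col_index), acc2.2 + 1)) acc
      = (acc.1 + (((PySem.List.slice (PySem.List.pyGetD image row_index "").toList (some cs) (some ce)).countP (fun ch => ch != ' ')) : Int),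
         acc.2 + max 0 (ce - cs)) := by
  intro n
  induction n with
  | zero =>
    intro cs acc hcs h0
    rw [PySem.List.pyRange_one_eq_nil (by omega)]
    rw [PySem.List.slice_toNat _ hcs hce]
    have ht : ce.toNat - cs.toNat = 0 := by omega
    have hm : max 0 (ce - cs) = 0 := by omega
    simp [ht, hm]
  | succ n ih =>
    intro cs acc hcs h
    have hlt : cs < ce := by omega
    rw [PySem.List.pyRange_one_cons hlt, List.foldl_cons]
    rw [ih (cs + 1) _ (by omega) (by omega)]
    have hmax : max 0 (ce - (cs + 1)) + 1 = max 0 (ce - cs) := by omega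
    refine Prod.ext ?_ (by simp; omega)
    simp only [get_pixel, pixel_is_filled]
    set s : List Char := (PySem.List.pyGetD image row_index "").toList with hs
    rw [PySem.List.slice_toNat s hcs hce, PySem.List.slice_toNat s (by omega : (0:Int) ≤ cs + 1) hce]
    by_cases hk : cs < (s.length : Int)
    · have hkl : cs.toNat < s.length := by omega
      rw [List.drop_eq_getElem_cons hkl]
      have htak : ce.toNat - cs.toNat = (ce.toNat - (cs + 1).toNat) + 1 := by omega
      have hdr : (cs + 1).toNat = cs.toNat + 1 := by omega
      rw [htak, hdr, List.take_succ_cons, List.countP_cons]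
      have hget : PySem.List.pyGetD s cs ' ' = s[cs.toNat]'hkl :=
        PySem.List.pyGetD_eq_getElem s ' ' hcs (by exact_mod_cast hk)
      by_cases hch : s[cs.toNat]'hkl = ' '
      · simp [← hs, hget, hk, hch]
      · simp [← hs, hget, hk, hch]
        omega
    · have hd1 : s.drop cs.toNat = [] := List.drop_eq_nil_of_le (by omega)
      have hd2 : s.drop (cs + 1).toNat = [] := List.drop_eq_nil_of_le (by omega)
      rw [hd1, hd2]
      simp [← hs, hk]

lemma pv_outer_eq (image : List String) (cs ce : Int) (hcs : 0 ≤ cs) (hlt : cs < ce) :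
    ∀ (rows : List Int) (acc : Int × Int),
      rows.foldl
        (fun acc row_index =>
          (PySem.List.pyRange cs ce 1).foldl
            (fun acc2 col_index =>
              (acc2.1 + pixel_is_filled (get_pixel image row_index col_index), acc2.2 + 1)) acc) acc
      = (rows.foldl
          (fun filled row_index =>
            filled + (((PySem.List.slice (PySem.List.pyGetD image row_index "").toList (some cs) (some ce)).countP (fun ch => ch != ' ')) : Int)) acc.1,
         acc.2 + (rows.length : Int) * max 0 (ce - cs)) := by
  intro rows
  induction rows with
  | nil => intro acc; simp
  | cons r rows ih =>
    intro acc
    rw [List.foldl_cons, List.foldl_cons]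
    rw [pv_inner_eq image r ce (by omega) (ce - cs).toNat cs acc hcs rfl]
    rw [ih _]
    refine Prod.ext rfl ?_
    simp
    ring

-- ===== VERDICT (by name: the statement is the Claim_ definition above) =====
theorem count_filled_in_block_spec : Claim_equal_count_filled_in_block := by
  intro image row_start row_end col_start col_end _hdom hpre
  unfold Spec_count_filled_in_block count_filled_in_block count_filled_in_block_alt
  by_cases h : col_start < col_end
  · by_cases hr : row_start < row_end
    · obtain ⟨hcs, _hrows⟩ := hpre hr h
      rw [pv_outer_eq image col_start col_end hcs h]
      rw [if_pos h]
      refine Prod.ext ?_ ?_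
      · rfl
      · simp [PySem.List.length_pyRange_one]
        omega
    · rw [PySem.List.pyRange_one_eq_nil (by omega : row_end ≤ row_start)]
      have h2 : max 0 (row_end - row_start) = 0 := by omega
      simp [h2]
  · rw [PySem.List.pyRange_one_eq_nil (by omega)]
    rw [if_neg h]
    have h2 : max 0 (col_end - col_start) = 0 := by omega
    simp [h2]
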